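-- pv_equiv track=rewrite | github.com/invertedstructure/D4-final-solver | app/make_manifest_full_scope.py | _co_allzero_cols
-- ===== SOURCE A (Python) =====
-- def _co_shape(A):
--     if not A: return (0,0)
--     return (len(A), len(A[0]) if A and isinstance(A[0], (list,tuple)) else 0)
--
-- def _co_allzero_cols(M):
--     m,n = _co_shape(M)
--     zero = [True]*n
--     for i in range(m):
--         row = M[i]
--         for j in range(n):
--             if row[j] == 1:
--                 zero[j] = False
--     return zero  # True means column is all zeros
-- ===== SOURCE B (Python) =====
-- def _co_shape(A):
--     if not A: return (0,0)
--     return (len(A), len(A[0]) if A and isinstance(A[0], (list,tuple)) else 0)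
--
-- def _co_allzero_cols(M):
--     m, n = _co_shape(M)
--     out = []
--     for j in range(n):
--         zero = True
--         for i in range(m):
--             if M[i][j] == 1:
--                 zero = False
--                 break
--         out.append(zero)
--     return out
-- ===== Notes on version B (the rewrite author's own statement) =====
-- stated objective: alternative
-- what changed: Replaces the row-major pass over a shared mutable accumulator with an independent short-circuiting per-column scan that breaks out of a column as soon as a 1 is found.
import Mathlib
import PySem

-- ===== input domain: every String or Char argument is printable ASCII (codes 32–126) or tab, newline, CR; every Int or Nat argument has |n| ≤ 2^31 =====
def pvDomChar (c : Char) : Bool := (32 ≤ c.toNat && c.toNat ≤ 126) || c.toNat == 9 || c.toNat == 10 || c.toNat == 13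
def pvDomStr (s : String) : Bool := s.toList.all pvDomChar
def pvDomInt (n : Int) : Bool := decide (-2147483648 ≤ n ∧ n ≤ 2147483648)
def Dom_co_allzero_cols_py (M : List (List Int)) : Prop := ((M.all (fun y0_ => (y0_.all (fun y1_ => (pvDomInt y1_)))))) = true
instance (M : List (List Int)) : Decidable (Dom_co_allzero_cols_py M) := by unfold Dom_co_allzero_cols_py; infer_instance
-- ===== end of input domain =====

-- B replaces A's row-major pass over one shared accumulator by an independent short-circuiting per-column scan (alternative decomposition, same worst-case cost).

-- ===== PORT A =====
def co_shape (A : List (List Int)) : Int × Int :=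
  if A = [] then (0, 0) else ((A.length : Int), ((A.headI).length : Int))

def co_allzero_cols_py (M : List (List Int)) : List Bool :=
  let mn := co_shape M
  (PySem.List.pyRange 0 mn.1 1).foldl (fun zero i =>
    let row := PySem.List.pyGetD M i []
    (PySem.List.pyRange 0 mn.2 1).foldl (fun z j =>
      if PySem.List.pyGetD row j 0 = 1 then PySem.List.pySetD z j false else z) zero)
    (List.replicate mn.2.toNat true)

-- ===== PORT B =====
-- inner 'for i ...: if M[i][j]==1: zero=False; break' loop of B
def colScan (M : List (List Int)) (j : Int) : List Int → Bool
  | [] => true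
  | i :: rest =>
      if PySem.List.pyGetD (PySem.List.pyGetD M i []) j 0 = 1 then false
      else colScan M j rest

def co_allzero_cols_py_alt (M : List (List Int)) : List Bool :=
  let mn := co_shape M
  (PySem.List.pyRange 0 mn.2 1).map (fun j => colScan M j (PySem.List.pyRange 0 mn.1 1))

-- ===== PRECONDITION & SPEC =====
-- Pre_ excludes ragged matrices where some row is shorter than the first row: there the Python A raises IndexError on row[j].
def Pre_co_allzero_cols_py (M : List (List Int)) : Prop :=
  ∀ row ∈ M, (M.headI).length ≤ row.length
instance (M : List (List Int)) : Decidable (Pre_co_allzero_cols_py M) := by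
  unfold Pre_co_allzero_cols_py; infer_instance

def pvWitness_co_allzero_cols_py : List (List Int) := [[0, 1, 0], [0, 0, 0]]

def Spec_co_allzero_cols_py (M : List (List Int)) (out : List Bool) : Prop := out = co_allzero_cols_py_alt M
instance (M : List (List Int)) (out : List Bool) : Decidable (Spec_co_allzero_cols_py M out) := by unfold Spec_co_allzero_cols_py; infer_instance

-- ===== CLAIM (what is proved, stated in full; the proofs are below) =====
def Claim_equal_co_allzero_cols_py : Prop := ∀ (M : List (List Int)), Dom_co_allzero_cols_py M → Pre_co_allzero_cols_py M → Spec_co_allzero_cols_py M (co_allzero_cols_py M)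

-- ===== LEMMAS AND PROOFS =====

-- the value M[i][j] both ports read (total form)
def getv (M : List (List Int)) (i j : Int) : Int :=
  PySem.List.pyGetD (PySem.List.pyGetD M i []) j 0

lemma colScan_eq (M : List (List Int)) (j : Int) (is : List Int) :
    colScan M j is = if ∃ i ∈ is, getv M i j = 1 then false else true := by
  induction is with
  | nil => simp [colScan]
  | cons i rest ih =>
      simp only [colScan, getv] at *
      by_cases h : PySem.List.pyGetD (PySem.List.pyGetD M i []) j 0 = 1
      · simp [h]
      · simp only [h, if_false, ih]
        by_cases hr : ∃ i' ∈ rest, PySem.List.pyGetD (PySem.List.pyGetD M i' []) j 0 = 1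
        · rcases hr with ⟨i', hi', hv'⟩
          rw [if_pos ⟨i', hi', hv'⟩, if_pos ⟨i', List.mem_cons_of_mem _ hi', hv'⟩]
        · rw [if_neg hr, if_neg (by
            rintro ⟨i', hi', hv'⟩
            rcases List.mem_cons.mp hi' with rfl | hm
            · exact h hv'
            · exact hr ⟨i', hm, hv'⟩)]

-- A's inner loop: position k of the accumulator after processing one row
lemma inner_get (M : List (List Int)) (i : Int) (n k : Nat) (z : List Bool) :
    ((PySem.List.pyRange 0 (n : Int) 1).foldl (fun z j =>
        if PySem.List.pyGetD (PySem.List.pyGetD M i []) j 0 = 1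
        then PySem.List.pySetD z j false else z) z)[k]? =
      if k < n ∧ getv M i (k : Int) = 1 then (z[k]?).map (fun _ => false) else z[k]? := by
  induction n generalizing z with
  | zero => simp
  | succ n ih =>
      have hlen : ∀ (w : List Bool),
          ((PySem.List.pyRange 0 (n : Int) 1).foldl (fun z j =>
            if PySem.List.pyGetD (PySem.List.pyGetD M i []) j 0 = 1
            then PySem.List.pySetD z j false else z) w).length = w.length := by
        intro w
        induction PySem.List.pyRange 0 (n : Int) 1 generalizing w with
        | nil => rfl
        | cons a t iht =>
            simp only [List.foldl_cons]
            rw [iht]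
            split
            · exact PySem.List.length_pySetD _ _ _
            · rfl
      have hsplit : PySem.List.pyRange 0 ((n : Int) + 1) 1 =
          PySem.List.pyRange 0 (n : Int) 1 ++ [(n : Int)] :=
        PySem.List.pyRange_one_succ_right (by positivity)
      push_cast
      rw [hsplit, List.foldl_append]
      simp only [List.foldl_cons, List.foldl_nil]
      by_cases hv : PySem.List.pyGetD (PySem.List.pyGetD M i []) (n : Int) 0 = 1
      · rw [if_pos hv, PySem.List.pySetD_natCast, List.getElem?_set, hlen, ih]
        by_cases hk : n = k
        · subst hk
          have hg : getv M i (n : Int) = 1 := hv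
          simp only [lt_irrefl, false_and, if_false, if_pos hg, Nat.lt_succ_self, true_and]
          rcases h : z[n]? with _ | b
          · have : z.length ≤ n := List.getElem?_eq_none_iff.mp h
            simp [if_neg (not_lt.mpr this)]
          · have : n < z.length := List.getElem?_eq_some_iff.mp h |>.1
            simp [if_pos this]
        · rw [if_neg (by tauto)]
          have : (k < n + 1 ∧ getv M i (k : Int) = 1) ↔ (k < n ∧ getv M i (k : Int) = 1) := by
            constructor
            · rintro ⟨h1, h2⟩; exact ⟨by omega, h2⟩
            · rintro ⟨h1, h2⟩; exact ⟨by omega, h2⟩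
          simp only [this]
      · rw [if_neg hv, ih]
        have : (k < n + 1 ∧ getv M i (k : Int) = 1) ↔ (k < n ∧ getv M i (k : Int) = 1) := by
          constructor
          · rintro ⟨h1, h2⟩
            rcases Nat.lt_succ_iff_lt_or_eq.mp h1 with h | h
            · exact ⟨h, h2⟩
            · subst h; exact absurd h2 hv
          · rintro ⟨h1, h2⟩; exact ⟨by omega, h2⟩
        simp only [this]

-- A's outer loop: position k of the accumulator after processing rows `is`
lemma outer_get (M : List (List Int)) (n : Nat) (is : List Int) (z : List Bool) (k : Nat) :
    (is.foldl (fun zero i =>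
        (PySem.List.pyRange 0 (n : Int) 1).foldl (fun z j =>
          if PySem.List.pyGetD (PySem.List.pyGetD M i []) j 0 = 1
          then PySem.List.pySetD z j false else z) zero) z)[k]? =
      if k < n ∧ ∃ i ∈ is, getv M i (k : Int) = 1
      then (z[k]?).map (fun _ => false) else z[k]? := by
  induction is generalizing z with
  | nil => simp
  | cons i rest ih =>
      simp only [List.foldl_cons, ih, inner_get]
      by_cases hkn : k < n
      · by_cases hi : getv M i (k : Int) = 1 <;>
          by_cases hr : ∃ i' ∈ rest, getv M i' (k : Int) = 1 <;>
            simp [hkn, hi, hr, Option.map_map]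
      · simp [hkn]

-- ===== VERDICT (by name: the statement is the Claim_ definition above) =====
theorem co_allzero_cols_py_spec : Claim_equal_co_allzero_cols_py := by
  intro M _ _
  unfold Spec_co_allzero_cols_py
  by_cases hM : M = []
  · subst hM; rfl
  · simp only [co_allzero_cols_py, co_allzero_cols_py_alt, co_shape, if_neg hM,
      Int.toNat_natCast]
    apply List.ext_getElem?
    intro k
    rw [outer_get M (M.headI.length) (PySem.List.pyRange 0 (M.length : Int) 1)
      (List.replicate M.headI.length true) k]
    rw [List.getElem?_map]
    by_cases hk : k < M.headI.length
    · have h1 : (List.replicate M.headI.length true)[k]? = some true := by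
        simp [hk]
      have h2 : (PySem.List.pyRange 0 ((M.headI.length : Int)) 1)[k]? = some ((k : Int)) := by
        have hl : k < (PySem.List.pyRange 0 ((M.headI.length : Int)) 1).length := by
          rw [PySem.List.length_pyRange_one]; omega
        rw [List.getElem?_eq_getElem hl, PySem.List.getElem_pyRange_one]
        simp
      rw [h1, h2]
      simp only [Option.map_some]
      rw [colScan_eq]
      by_cases he : ∃ i ∈ PySem.List.pyRange 0 (M.length : Int) 1, getv M i (k : Int) = 1
      · rw [if_pos ⟨hk, he⟩, if_pos he]
      · rw [if_neg (fun h => he h.2), if_neg he]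
    · have h1 : (List.replicate M.headI.length true)[k]? = none := by
        simp [hk]
      have h2 : (PySem.List.pyRange 0 ((M.headI.length : Int)) 1)[k]? = none := by
        rw [List.getElem?_eq_none_iff, PySem.List.length_pyRange_one]
        omega
      rw [h1, h2]
      simp [hk]
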